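-- pv_equiv track=rewrite | github.com/jrecuero/pythonator | mockerator.py | generateSequenceToProcess
-- ===== SOURCE A (Python) =====
-- def generateSequenceToProcess(walkingSequence, dirKlass):
--     """ Generate the sequence of attributes that has to be processed.
--
--     It check is any wildcard was passed in order to look for methods that match
--     with the pattern.
--
--     :type walkingSequence: list
--     :param walkingSequence: List with all attributes to be matched.
--
--     :type dirKlass: list
--     :param dirKlass: List with all attributes for the class.
--
--     :rtype: list
--     :return: List with all class attributes that have to be processed.
--     """
--     sequenceToProcess = []
--     for attrName in walkingSequence:
--         if '*' in attrName:
--             attrName = attrName[0:-1]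
--             for klassAttrName in dirKlass:
--                 if klassAttrName.startswith(attrName):
--                     sequenceToProcess.append(klassAttrName)
--         else:
--             sequenceToProcess.append(attrName)
--     return sequenceToProcess
-- ===== SOURCE B (Python) =====
-- def generateSequenceToProcess(walkingSequence, dirKlass):
--     # Build the prefix->matches index in ONE pass over dirKlass instead of
--     # rescanning dirKlass for every wildcard entry of walkingSequence.
--     matches = {}
--     for attrName in walkingSequence:
--         if '*' in attrName:
--             matches[attrName[:-1]] = []
--     for klassAttrName in dirKlass:
--         for prefix in matches:
--             if klassAttrName.startswith(prefix):
--                 matches[prefix].append(klassAttrName)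
--     out = []
--     for attrName in walkingSequence:
--         if '*' in attrName:
--             out.extend(matches[attrName[:-1]])
--         else:
--             out.append(attrName)
--     return out
-- ===== Notes on version B (the rewrite author's own statement) =====
-- stated objective: alternative
-- what changed: B inverts the loop nest: it collects the wildcard prefixes once, builds a prefix-to-matches index in a single pass over dirKlass, and then assembles the output from that index, instead of rescanning dirKlass for every wildcard entry of walkingSequence.
import Mathlib
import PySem

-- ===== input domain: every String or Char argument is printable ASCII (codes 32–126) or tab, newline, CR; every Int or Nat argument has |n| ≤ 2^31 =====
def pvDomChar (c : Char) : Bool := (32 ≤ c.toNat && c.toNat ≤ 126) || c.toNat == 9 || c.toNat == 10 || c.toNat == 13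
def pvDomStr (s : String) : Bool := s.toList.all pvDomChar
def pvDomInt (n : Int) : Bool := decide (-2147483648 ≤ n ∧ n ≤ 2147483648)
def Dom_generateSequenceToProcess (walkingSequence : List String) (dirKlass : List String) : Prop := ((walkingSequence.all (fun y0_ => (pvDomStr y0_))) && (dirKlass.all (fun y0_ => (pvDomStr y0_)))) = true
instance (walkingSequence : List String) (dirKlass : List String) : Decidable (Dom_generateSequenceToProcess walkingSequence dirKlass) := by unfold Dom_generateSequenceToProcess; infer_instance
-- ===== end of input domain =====

-- B inverts A's loop nest: it builds the wildcard-prefix → matches index in a single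
-- pass over dirKlass, instead of rescanning dirKlass for every wildcard entry
-- (objective: alternative — a different traversal at similar cost, not claimed faster).

-- ===== PORT A =====
def generateSequenceToProcess (walkingSequence : List String) (dirKlass : List String) : List String :=
  walkingSequence.foldl (fun sequenceToProcess attrName =>
    if PySem.Str.isIn "*" attrName then
      -- attrName = attrName[0:-1]
      let attrName' := PySem.Str.slice attrName (some 0) (some (-1))
      dirKlass.foldl (fun acc klassAttrName =>
        if PySem.Str.startswith klassAttrName attrName' then acc ++ [klassAttrName] else acc)
        sequenceToProcess
    else sequenceToProcess ++ [attrName]) []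

-- ===== PORT B =====
-- attrName[:-1]
def gstpPrefix (attrName : String) : String := PySem.Str.slice attrName none (some (-1))

def generateSequenceToProcess_alt (walkingSequence : List String) (dirKlass : List String) : List String :=
  -- matches = {};  for attrName in walkingSequence: if '*' in attrName: matches[attrName[:-1]] = []
  let mtchs0 : PySem.Dict String (List String) :=
    walkingSequence.foldl (fun d attrName =>
      if PySem.Str.isIn "*" attrName then d.insert (gstpPrefix attrName) [] else d)
      PySem.Dict.empty
  -- for klassAttrName in dirKlass: for prefix in matches: if klassAttrName.startswith(prefix): matches[pfx].append(klassAttrName)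
  -- (the keys are never changed by the inner loop, so iterating the snapshot d.keys is Python's live iteration)
  let mtchs : PySem.Dict String (List String) :=
    dirKlass.foldl (fun d klassAttrName =>
      d.keys.foldl (fun d' pfx =>
        if PySem.Str.startswith klassAttrName pfx then d'.modify pfx [] (· ++ [klassAttrName]) else d')
        d)
      mtchs0
  -- out = []; for attrName in walkingSequence: extend(matches[attrName[:-1]]) / append(attrName)
  walkingSequence.foldl (fun out attrName =>
    if PySem.Str.isIn "*" attrName then out ++ mtchs.getD (gstpPrefix attrName) []
    else out ++ [attrName]) []

-- ===== PRECONDITION & SPEC =====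
def Spec_generateSequenceToProcess (walkingSequence : List String) (dirKlass : List String) (out : List String) : Prop := out = generateSequenceToProcess_alt walkingSequence dirKlass
instance (walkingSequence : List String) (dirKlass : List String) (out : List String) : Decidable (Spec_generateSequenceToProcess walkingSequence dirKlass out) := by unfold Spec_generateSequenceToProcess; infer_instance

-- ===== CLAIM (what is proved, stated in full; the proofs are below) =====
def Claim_equal_generateSequenceToProcess : Prop := ∀ (walkingSequence : List String) (dirKlass : List String), Dom_generateSequenceToProcess walkingSequence dirKlass → Spec_generateSequenceToProcess walkingSequence dirKlass (generateSequenceToProcess walkingSequence dirKlass)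

-- ===== LEMMAS AND PROOFS =====

-- A's port, [0:-1] and B's [:-1] slice the same string.
theorem gstp_slice_eq (a : String) :
    PySem.Str.slice a (some 0) (some (-1)) = gstpPrefix a := by
  simp [gstpPrefix, PySem.Str.slice]

-- Phase 1 of B: every value stored is [], so every getD with default [] is [].
theorem gstp_phase1_getD (ws : List String) (d : PySem.Dict String (List String)) (q : String)
    (h : d.getD q [] = []) :
    (ws.foldl (fun d a => if PySem.Str.isIn "*" a then d.insert (gstpPrefix a) [] else d) d).getD q [] = [] := by
  induction ws generalizing d with
  | nil => exact h
  | cons a ws ih =>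
    simp only [List.foldl_cons]
    split
    · exact ih _ (by rw [PySem.Dict.getD_insert]; split <;> simp [h])
    · exact ih _ h

-- Phase 1 of B: q is a key iff q is the prefix of some wildcard entry (or was a key before).
theorem gstp_phase1_keys (ws : List String) (d : PySem.Dict String (List String)) (q : String) :
    q ∈ (ws.foldl (fun d a => if PySem.Str.isIn "*" a then d.insert (gstpPrefix a) [] else d) d).keys ↔
      (∃ a ∈ ws, PySem.Str.isIn "*" a = true ∧ gstpPrefix a = q) ∨ q ∈ d.keys := by
  induction ws generalizing d with
  | nil => simp
  | cons a ws ih =>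
    simp only [List.foldl_cons, List.mem_cons]
    split
    · rename_i hw
      rw [ih, PySem.Dict.mem_keys_insert]
      constructor
      · rintro (⟨x, hx, h1, h2⟩ | h | h)
        · exact Or.inl ⟨x, Or.inr hx, h1, h2⟩
        · exact Or.inl ⟨a, Or.inl rfl, hw, h.symm⟩
        · exact Or.inr h
      · rintro (⟨x, hx | hx, h1, h2⟩ | h)
        · exact Or.inr (Or.inl (by rw [hx] at h2; exact h2.symm))
        · exact Or.inl ⟨x, hx, h1, h2⟩
        · exact Or.inr (Or.inr h)
    · rename_i hw
      rw [ih]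
      constructor
      · rintro (⟨x, hx, h1, h2⟩ | h)
        · exact Or.inl ⟨x, Or.inr hx, h1, h2⟩
        · exact Or.inr h
      · rintro (⟨x, hx | hx, h1, h2⟩ | h)
        · exact absurd (hx ▸ h1) hw
        · exact Or.inl ⟨x, hx, h1, h2⟩
        · exact Or.inr h

-- Phase 1 of B keeps the keys Nodup (fold-with-if as fold over the filtered list).
theorem gstp_phase1_nodup (ws : List String) :
    (ws.foldl (fun d a => if PySem.Str.isIn "*" a then d.insert (gstpPrefix a) [] else d)
      (PySem.Dict.empty : PySem.Dict String (List String))).keys.Nodup := by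
  have h2 : (List.foldl (fun (d : PySem.Dict String (List String)) a =>
        if PySem.Str.isIn "*" a = true then d.insert (gstpPrefix a) [] else d) PySem.Dict.empty ws) =
      List.foldl (fun d a => d.insert (gstpPrefix a) []) PySem.Dict.empty
        (ws.filter (fun a => PySem.Str.isIn "*" a)) :=
    PySem.List.foldl_if_eq_foldl_filter _ _ _ _
  rw [h2]
  exact PySem.Dict.nodup_keys_foldl_insert_key _ gstpPrefix (fun _ _ => []) _ (by simp)

-- B's inner loop over a Nodup key list appends k to exactly the matching keys' values.
theorem gstp_inner_getD (k : String) (ks : List String) (hnd : ks.Nodup)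
    (d : PySem.Dict String (List String)) (q : String) :
    (ks.foldl (fun d' p =>
        if PySem.Str.startswith k p then d'.modify p [] (· ++ [k]) else d') d).getD q [] =
      if q ∈ ks ∧ PySem.Str.startswith k q then d.getD q [] ++ [k] else d.getD q [] := by
  induction ks generalizing d with
  | nil => simp
  | cons p ks ih =>
    have hnd' := hnd
    simp only [List.nodup_cons] at hnd'
    simp only [List.foldl_cons]
    by_cases hs : PySem.Str.startswith k p
    · rw [if_pos hs, ih hnd'.2, PySem.Dict.getD_modify]
      by_cases hqp : q = p
      · subst hqp
        rw [if_neg (by exact fun h => hnd'.1 h.1), if_pos rfl]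
        simp_all
      · rw [if_neg hqp]
        by_cases hqk : q ∈ ks ∧ PySem.Str.startswith k q = true
        · simp [hqk, List.mem_cons, hqp]
        · simp only [if_neg hqk]
          rw [if_neg (by rintro ⟨hm, hw⟩; rcases List.mem_cons.mp hm with h | h
                         exacts [hqp h, hqk ⟨h, hw⟩])]
    · rw [if_neg hs, ih hnd'.2]
      by_cases hqk : q ∈ ks ∧ PySem.Str.startswith k q = true
      · simp [hqk, List.mem_cons]
      · simp only [if_neg hqk]
        rw [if_neg (by rintro ⟨hm, hw⟩; rcases List.mem_cons.mp hm with h | h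
                       exacts [hs (h ▸ hw), hqk ⟨h, hw⟩])]

-- B's inner loop does not change the key list.
theorem gstp_inner_keys (k : String) (ks : List String)
    (d : PySem.Dict String (List String)) (hks : ∀ p ∈ ks, p ∈ d.keys) :
    (ks.foldl (fun d' p =>
        if PySem.Str.startswith k p then d'.modify p [] (· ++ [k]) else d') d).keys = d.keys := by
  induction ks generalizing d with
  | nil => rfl
  | cons p ks ih =>
    simp only [List.foldl_cons]
    split
    · have hkeys : (d.modify p [] (· ++ [k])).keys = d.keys := by
        rw [PySem.Dict.keys_modify, PySem.Dict.keys_insert_of_contains]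
        exact (PySem.Dict.contains_iff_mem_keys d p).mpr (hks p (List.mem_cons_self ..))
      rw [ih _ (by rw [hkeys]; exact fun x hx => hks x (List.mem_cons_of_mem _ hx)), hkeys]
    · exact ih _ (fun x hx => hks x (List.mem_cons_of_mem _ hx))

-- Phase 2 of B: each key's value collects the dirKlass attributes that start with it, in order.
theorem gstp_phase2_getD (dk : List String) (d : PySem.Dict String (List String))
    (hnd : d.keys.Nodup) (q : String) (hq : q ∈ d.keys) :
    (dk.foldl (fun d k =>
        d.keys.foldl (fun d' p =>
          if PySem.Str.startswith k p then d'.modify p [] (· ++ [k]) else d') d) d).getD q [] =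
      d.getD q [] ++ dk.filter (fun k => PySem.Str.startswith k q) := by
  induction dk generalizing d with
  | nil => simp
  | cons k dk ih =>
    simp only [List.foldl_cons]
    have hkeys := gstp_inner_keys k d.keys d (fun _ h => h)
    rw [ih _ (by rw [hkeys]; exact hnd) (by rw [hkeys]; exact hq),
        gstp_inner_getD k d.keys hnd d q]
    by_cases hs : PySem.Str.startswith k q
    · simp only [PySem.Str.startswith_eq] at hs
      simp [hq, hs]
    · simp only [PySem.Str.startswith_eq] at hs
      simp [hs]

-- A's wildcard branch is a filter of dirKlass.
theorem gstp_a_inner (dk acc : List String) (p : String) :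
    dk.foldl (fun acc k => if PySem.Str.startswith k p then acc ++ [k] else acc) acc =
      acc ++ dk.filter (fun k => PySem.Str.startswith k p) :=
  PySem.List.foldl_append_if_eq_filter _ dk acc

-- ===== VERDICT (by name: the statement is the Claim_ definition above) =====
theorem generateSequenceToProcess_spec : Claim_equal_generateSequenceToProcess := by
  intro ws dk _
  unfold Spec_generateSequenceToProcess generateSequenceToProcess generateSequenceToProcess_alt
  apply PySem.List.foldl_congr_mem
  intro acc a ha
  by_cases hw : PySem.Str.isIn "*" a
  · simp only [hw, if_true, gstp_a_inner, gstp_slice_eq]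
    congr 1
    rw [gstp_phase2_getD _ _ (gstp_phase1_nodup ws) _
          ((gstp_phase1_keys ws PySem.Dict.empty _).mpr (Or.inl ⟨a, ha, hw, rfl⟩)),
        gstp_phase1_getD ws PySem.Dict.empty _ (by simp), List.nil_append]
  · rw [Bool.not_eq_true] at hw
    simp only [hw, Bool.false_eq_true, if_false]
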